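-- pv_equiv track=rewrite | github.com/Wheest/rspl_examples | rsp_depthwise_conv2d_general/conv2d_rspl_gen.py | calculate_partitions
-- ===== SOURCE A (Python) =====
-- def calculate_partitions(in_h, padding, kdim_h, stride, max_height):
--     # Calculate the total height including padding
--     total_padded_height = in_h + 2 * padding
--
--     # The number of rows that will be overlapped due to the kernel - stride + 1
--     overlap = max(kdim_h - stride, 0)
--
--     # Calculate the number of partitions
--     # Start with the first partition
--     partitions = 1
--     current_end = max_height  # End row of the current partition
--
--     while current_end < total_padded_height:
--         # Slide the window by stride until we need a new partition
--         start = (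
--             current_end - overlap
--         )  # We can reuse the overlap from the previous partition
--         current_end = start + max_height
--
--         # Every loop corresponds to one additional partition needed
--         partitions += 1
--
--     return partitions
-- ===== SOURCE B (Python) =====
-- def calculate_partitions(in_h, padding, kdim_h, stride, max_height):
--     # Closed form: each loop iteration of A advances the window end by
--     # step = max_height - overlap, so the number of extra partitions is the
--     # ceiling of (total - max_height) / step.
--     total = in_h + 2 * padding
--     if total <= max_height:
--         return 1
--     step = max_height - max(kdim_h - stride, 0)
--     # ceil((total - max_height) / step) via floor division
--     return 1 + -((max_height - total) // step)
-- ===== Notes on version B (the rewrite author's own statement) =====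
-- stated objective: simpler
-- what changed: Replaces A's sliding-window while loop with a closed-form ceiling division of the remaining padded height by the constant advance (max_height - overlap).
import Mathlib
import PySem

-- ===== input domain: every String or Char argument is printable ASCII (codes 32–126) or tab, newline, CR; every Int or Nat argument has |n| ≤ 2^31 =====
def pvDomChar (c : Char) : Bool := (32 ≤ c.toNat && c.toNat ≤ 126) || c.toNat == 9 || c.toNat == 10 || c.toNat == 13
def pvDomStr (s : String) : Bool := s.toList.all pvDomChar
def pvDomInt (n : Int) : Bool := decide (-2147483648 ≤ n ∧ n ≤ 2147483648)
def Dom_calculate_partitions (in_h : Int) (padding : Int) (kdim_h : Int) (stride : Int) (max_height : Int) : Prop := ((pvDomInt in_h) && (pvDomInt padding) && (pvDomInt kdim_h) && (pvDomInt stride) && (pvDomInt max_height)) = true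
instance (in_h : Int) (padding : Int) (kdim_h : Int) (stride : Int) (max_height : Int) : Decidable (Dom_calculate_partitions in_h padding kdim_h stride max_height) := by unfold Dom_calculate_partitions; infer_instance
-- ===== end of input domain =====

-- B replaces A's sliding-window while loop by a closed-form ceiling division;
-- return-value equivalence proved on all inputs where A's loop terminates.

-- ===== PORT A =====
-- A's while loop; fuel bounds the iterations (on Pre_ the loop advances by at
-- least 1 per iteration, so the supplied fuel is never exhausted).
def calcPartsLoopA (total overlap max_height : Int) : Nat → Int → Int → Int
  | 0, partitions, _ => partitions
  | fuel + 1, partitions, current_end =>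
    if current_end < total then
      calcPartsLoopA total overlap max_height fuel (partitions + 1)
        ((current_end - overlap) + max_height)
    else partitions

def calculate_partitions (in_h : Int) (padding : Int) (kdim_h : Int) (stride : Int) (max_height : Int) : Int :=
  let total_padded_height := in_h + 2 * padding
  let overlap := max (kdim_h - stride) 0
  calcPartsLoopA total_padded_height overlap max_height
    ((total_padded_height - max_height).toNat + 1) 1 max_height

-- ===== PORT B =====
def calculate_partitions_alt (in_h : Int) (padding : Int) (kdim_h : Int) (stride : Int) (max_height : Int) : Int :=
  let total := in_h + 2 * padding
  if total ≤ max_height then 1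
  else
    let step := max_height - max (kdim_h - stride) 0
    1 + -(PySem.Int.floordiv (max_height - total) step)

-- ===== PRECONDITION & SPEC =====
-- Pre_ excludes exactly the inputs where A's loop never terminates (the window
-- advance max_height - overlap is ≤ 0 while the loop is entered): A diverges there.
def Pre_calculate_partitions (in_h : Int) (padding : Int) (kdim_h : Int) (stride : Int) (max_height : Int) : Prop :=
  in_h + 2 * padding ≤ max_height ∨ max (kdim_h - stride) 0 < max_height
instance (in_h : Int) (padding : Int) (kdim_h : Int) (stride : Int) (max_height : Int) : Decidable (Pre_calculate_partitions in_h padding kdim_h stride max_height) := by unfold Pre_calculate_partitions; infer_instance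

def pvWitness_calculate_partitions : Int × Int × Int × Int × Int := (10, 1, 3, 1, 5)

def Spec_calculate_partitions (in_h : Int) (padding : Int) (kdim_h : Int) (stride : Int) (max_height : Int) (out : Int) : Prop := out = calculate_partitions_alt in_h padding kdim_h stride max_height
instance (in_h : Int) (padding : Int) (kdim_h : Int) (stride : Int) (max_height : Int) (out : Int) : Decidable (Spec_calculate_partitions in_h padding kdim_h stride max_height out) := by unfold Spec_calculate_partitions; infer_instance

-- ===== CLAIM (what is proved, stated in full; the proofs are below) =====
def Claim_equal_calculate_partitions : Prop := ∀ (in_h : Int) (padding : Int) (kdim_h : Int) (stride : Int) (max_height : Int), Dom_calculate_partitions in_h padding kdim_h stride max_height → Pre_calculate_partitions in_h padding kdim_h stride max_height → Spec_calculate_partitions in_h padding kdim_h stride max_height (calculate_partitions in_h padding kdim_h stride max_height)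

-- ===== LEMMAS AND PROOFS =====

-- Loop characterisation: with a positive advance and sufficient fuel, the loop
-- adds the ceiling of the remaining distance divided by the advance.
theorem calcPartsLoopA_eq (total overlap max_height : Int)
    (hstep : 0 < max_height - overlap) :
    ∀ (fuel : Nat) (p ce : Int), (total - ce).toNat ≤ fuel →
      calcPartsLoopA total overlap max_height fuel p ce =
        if ce < total then p + -(PySem.Int.floordiv (ce - total) (max_height - overlap)) else p := by
  intro fuel
  induction fuel with
  | zero =>
    intro p ce hf
    have : ¬ ce < total := by omega
    simp [calcPartsLoopA, this]
  | succ n ih =>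
    intro p ce hf
    set step := max_height - overlap with hstepdef
    by_cases hlt : ce < total
    · have hce' : (ce - overlap) + max_height = ce + step := by omega
      have hrec := ih (p + 1) (ce + step) (by omega)
      simp only [calcPartsLoopA, hlt, if_true, hce', hrec]
      by_cases h2 : ce + step < total
      · simp only [h2, if_true]
        set q := PySem.Int.floordiv (ce + step - total) step with hq
        have hqs : q * step ≤ ce + step - total ∧ ce + step - total < (q + 1) * step :=
          (PySem.Int.floordiv_eq_iff_of_pos hstep).mp hq.symm
        have : PySem.Int.floordiv (ce - total) step = q - 1 := by
          rw [PySem.Int.floordiv_eq_iff_of_pos hstep]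
          constructor <;> nlinarith [hqs.1, hqs.2]
        rw [this]; ring
      · simp only [h2, if_false]
        have : PySem.Int.floordiv (ce - total) step = -1 := by
          rw [PySem.Int.floordiv_eq_iff_of_pos hstep]
          constructor <;> nlinarith
        rw [this]; ring
    · simp [calcPartsLoopA, hlt]

-- ===== VERDICT (by name: the statement is the Claim_ definition above) =====
theorem calculate_partitions_spec : Claim_equal_calculate_partitions := by
  intro in_h padding kdim_h stride max_height _ hpre
  unfold Spec_calculate_partitions calculate_partitions calculate_partitions_alt
  set total := in_h + 2 * padding with htot
  set overlap := max (kdim_h - stride) 0 with hov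
  by_cases hle : total ≤ max_height
  · have : ¬ max_height < total := by omega
    simp [calcPartsLoopA, this, hle]
  · have hstep : 0 < max_height - overlap := by
      rcases hpre with h | h
      · omega
      · omega
    have h := calcPartsLoopA_eq total overlap max_height hstep
      ((total - max_height).toNat + 1) 1 max_height (by omega)
    have hlt : max_height < total := by omega
    simp only [h, hlt, if_true, hle, if_false]
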